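-- pv_equiv track=rewrite | github.com/allainclair/alg | quora/fake-test/alternatingSort.py | alternatingSort
-- ===== SOURCE A (Python) =====
-- def alternatingSort(a):
--     b = []
--     i, j = 0, -1
--     prev = float('-inf')
--     for k, _ in enumerate(a):
--         if k % 2 == 0:
--             b.append(a[i])
--             if prev >= a[i]:
--                 return False
--             prev = a[i]
--             i += 1
--         else:
--             b.append(a[j])
--             if prev >= a[j]:
--                 return False
--             prev = a[j]
--             j -= 1
--     return True
-- ===== SOURCE B (Python) =====
-- def alternatingSort(a):
--     n = len(a)
--     half = (n + 1) // 2
--     front = a[:half]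
--     back = a[half:][::-1]
--     merged = []
--     for x, y in zip(front, back):
--         merged.append(x)
--         merged.append(y)
--     if n % 2 == 1:
--         merged.append(a[n // 2])
--     return all(p < q for p, q in zip(merged, merged[1:]))
-- ===== Notes on version B (the rewrite author's own statement) =====
-- stated objective: alternative
-- what changed: B materialises the front/back interleaved sequence once (front half zipped with the reversed back half, plus the middle element for odd length) and then checks adjacent pairs, replacing A's single loop that juggles two indices, a -inf sentinel and an early return.
import Mathlib
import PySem

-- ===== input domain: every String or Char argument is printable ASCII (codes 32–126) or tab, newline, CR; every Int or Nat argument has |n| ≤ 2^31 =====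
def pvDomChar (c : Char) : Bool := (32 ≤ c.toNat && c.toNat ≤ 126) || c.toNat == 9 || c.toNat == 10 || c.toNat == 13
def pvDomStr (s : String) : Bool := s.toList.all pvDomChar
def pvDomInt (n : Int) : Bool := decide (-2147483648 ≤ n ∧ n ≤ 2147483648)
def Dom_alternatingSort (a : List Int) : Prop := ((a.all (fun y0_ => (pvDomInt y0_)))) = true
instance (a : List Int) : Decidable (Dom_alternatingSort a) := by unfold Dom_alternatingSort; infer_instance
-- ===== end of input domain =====

-- B builds the interleaved sequence a[0],a[-1],a[1],a[-2],… explicitly (front half zipped with the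
-- reversed back half) and then checks adjacent pairs, instead of A's single index-juggling loop
-- with an early return; objective: alternative decomposition, same cost.


-- ===== PORT A =====
-- prev >= x where prev is either float('-inf') (none) or an int seen before
def pyGEInf : Option Int → Int → Bool
  | none, _ => false
  | some p, x => decide (x ≤ p)

-- the for-loop of A over enumerate(a), with state i, j, prev; early 'return False' = result false
def altALoop (a : List Int) (i j : Int) (prev : Option Int) : List (Int × Int) → Bool
  | [] => true
  | (k, _) :: rest =>
    if PySem.Int.mod k 2 = 0 then
      match PySem.List.pyGet? a i with
      | none => false    -- IndexError (never reached: i stays in range)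
      | some x => if pyGEInf prev x then false else altALoop a (i + 1) j (some x) rest
    else
      match PySem.List.pyGet? a j with
      | none => false    -- IndexError (never reached: j stays in range)
      | some x => if pyGEInf prev x then false else altALoop a i (j - 1) (some x) rest

def alternatingSort (a : List Int) : Bool :=
  altALoop a 0 (-1) none (PySem.List.enumerate a 0)

-- ===== PORT B =====
def alternatingSort_alt (a : List Int) : Bool :=
  let n : Int := PySem.List.len a
  let half : Int := PySem.Int.floordiv (n + 1) 2
  let front := PySem.List.slice a none (some half)
  -- a[half:][::-1]; [::-1] is reversal (PySem.List.slice?_none_none_neg_one)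
  let back := (PySem.List.slice a (some half) none).reverse
  let merged := (front.zip back).foldl (fun acc xy => acc ++ [xy.1, xy.2]) []
  let merged := if PySem.Int.mod n 2 = 1 then
      -- a[n // 2]: n odd, so n // 2 < n is always in range
      merged ++ [PySem.List.pyGetD a (PySem.Int.floordiv n 2) 0]
    else merged
  (merged.zip (PySem.List.slice merged (some 1) none)).all (fun pq => decide (pq.1 < pq.2))

-- ===== PRECONDITION & SPEC =====
def Spec_alternatingSort (a : List Int) (out : Bool) : Prop := out = alternatingSort_alt a
instance (a : List Int) (out : Bool) : Decidable (Spec_alternatingSort a out) := by unfold Spec_alternatingSort; infer_instance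

-- ===== CLAIM (what is proved, stated in full; the proofs are below) =====
def Claim_equal_alternatingSort : Prop := ∀ (a : List Int), Dom_alternatingSort a → Spec_alternatingSort a (alternatingSort a)

-- ===== LEMMAS AND PROOFS =====

-- position in a of the k-th element of the interleaved sequence
def itlIdx (n k : Nat) : Nat := if k % 2 = 0 then k / 2 else n - (k + 1) / 2

-- the interleaved sequence itself
def itl (a : List Int) : List Int :=
  (List.range a.length).map (fun k => a.getD (itlIdx a.length k) 0)

-- strictly-increasing check with an optional (-inf) previous value
def chainB : Option Int → List Int → Bool
  | _, [] => true
  | prev, x :: xs => if pyGEInf prev x then false else chainB (some x) xs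

-- adjacent-pairs check (B's final pass)
def pairAll (l : List Int) : Bool := (l.zip l.tail).all (fun pq => decide (pq.1 < pq.2))

lemma chainB_some (l : List Int) : ∀ p, chainB (some p) l = ((p :: l).zip l).all (fun pq => decide (pq.1 < pq.2)) := by
  induction l with
  | nil => intro p; rfl
  | cons x xs ih =>
    intro p
    simp [chainB, pyGEInf, List.zip, ih x]
    by_cases h : x ≤ p
    · simp [h, show ¬ p < x by omega]
    · simp [h, show p < x by omega]

lemma chainB_none (l : List Int) : chainB none l = pairAll l := by
  cases l with
  | nil => rfl
  | cons x xs => simp [chainB, pyGEInf, pairAll, chainB_some]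

lemma loopA_eq (a : List Int) (f : Nat) : ∀ (m : Nat) (prev : Option Int), a.length - m = f →
    altALoop a (((m + 1) / 2 : Nat) : Int) (-(((1 + m / 2 : Nat) : Nat) : Int)) prev
      (PySem.List.enumerate (a.drop m) m)
    = chainB prev ((List.range (a.length - m)).map (fun t => a.getD (itlIdx a.length (m + t)) 0)) := by
  induction f with
  | zero =>
    intro m prev h
    have hm : a.length ≤ m := by omega
    simp [List.drop_eq_nil_of_le hm, h, altALoop, chainB]
  | succ f ih =>
    intro m prev h
    have hm : m < a.length := by omega
    rw [List.drop_eq_getElem_cons hm, PySem.List.enumerate_cons]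
    have hrange : a.length - m = (a.length - (m + 1)) + 1 := by omega
    rw [hrange, List.range_succ_eq_map, List.map_cons, List.map_map]
    have hmapeq : (List.range (a.length - (m + 1))).map ((fun t => a.getD (itlIdx a.length (m + t)) 0) ∘ (· + 1))
        = (List.range (a.length - (m + 1))).map (fun t => a.getD (itlIdx a.length ((m + 1) + t)) 0) := by
      apply List.map_congr_left; intro t _; simp [Function.comp]; ring_nf
    rw [hmapeq]
    have hmod : PySem.Int.mod (m : Int) 2 = ((m % 2 : Nat) : Int) := by
      exact_mod_cast PySem.Int.mod_natCast m 2
    rcases Nat.even_or_odd m with he | ho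
    · -- even step: reads a[m/2], i increments
      have hm2 : m % 2 = 0 := Nat.even_iff.mp he
      have hidx : itlIdx a.length m = m / 2 := by simp [itlIdx, hm2]
      have hlt : m / 2 < a.length := by omega
      simp only [altALoop, hmod, hm2]
      rw [if_pos (by norm_num)]
      rw [PySem.List.pyGet?_natCast, List.getElem?_eq_getElem (show (m + 1) / 2 < a.length by omega)]
      simp only [chainB, Nat.add_zero, hidx]
      have hget : a[(m + 1) / 2] = a.getD (m / 2) 0 := by
        rw [List.getD_eq_getElem a 0 hlt]; congr 1; omega
      rw [hget]
      by_cases hge : pyGEInf prev (a.getD (m / 2) 0) = true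
      · rw [if_pos hge, if_pos hge]
      · rw [if_neg hge, if_neg hge]
        have hi : (((m + 1) / 2 : Nat) : Int) + 1 = (((m + 1 + 1) / 2 : Nat) : Int) := by
          push_cast; omega
        have hj : (-(((1 + m / 2 : Nat) : Nat) : Int)) = (-(((1 + (m + 1) / 2 : Nat) : Nat) : Int)) := by
          push_cast; omega
        rw [hi, hj, show ((m : Int) + 1) = ((m + 1 : Nat) : Int) by push_cast; ring]
        exact ih (m + 1) (some (a.getD (m / 2) 0)) (by omega)
    · -- odd step: reads a[-(1 + m/2)], j decrements
      have hm2 : m % 2 = 1 := Nat.odd_iff.mp ho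
      have hidx : itlIdx a.length m = a.length - (1 + m / 2) := by
        simp [itlIdx, hm2]; congr 1; omega
      have hk1 : 0 < 1 + m / 2 := by omega
      have hk2 : 1 + m / 2 ≤ a.length := by omega
      simp only [altALoop, hmod, hm2]
      rw [if_neg (by norm_num)]
      rw [PySem.List.pyGet?_neg_natCast a (1 + m / 2) hk1 hk2,
        List.getElem?_eq_getElem (show a.length - (1 + m / 2) < a.length by omega)]
      simp only [chainB, Nat.add_zero, hidx]
      have hget : a[a.length - (1 + m / 2)] = a.getD (a.length - (1 + m / 2)) 0 := by
        rw [List.getD_eq_getElem a 0 (by omega)]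
      rw [hget]
      by_cases hge : pyGEInf prev (a.getD (a.length - (1 + m / 2)) 0) = true
      · rw [if_pos hge, if_pos hge]
      · rw [if_neg hge, if_neg hge]
        have hi : (((m + 1) / 2 : Nat) : Int) = (((m + 1 + 1) / 2 : Nat) : Int) := by
          push_cast; omega
        have hj : (-(((1 + m / 2 : Nat) : Nat) : Int)) - 1 = (-(((1 + (m + 1) / 2 : Nat) : Nat) : Int)) := by
          push_cast; omega
        rw [hi, hj, show ((m : Int) + 1) = ((m + 1 : Nat) : Int) by push_cast; ring]
        exact ih (m + 1) _ (by omega)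

lemma portA_eq_chain (a : List Int) : alternatingSort a = chainB none (itl a) := by
  have := loopA_eq a (a.length) 0 none (by omega)
  simpa [alternatingSort, itl] using this

-- flatMap of pairs, read at index k
lemma flatPairs_getD (l : List (Int × Int)) : ∀ k : Nat,
    (l.flatMap (fun xy => [xy.1, xy.2])).getD k 0
      = (if k % 2 = 0 then (l.getD (k / 2) (0, 0)).1 else (l.getD (k / 2) (0, 0)).2) := by
  induction l with
  | nil => intro k; simp [List.getD]
  | cons x xs ih =>
    intro k
    match k with
    | 0 => rfl
    | 1 => rfl
    | (k + 2) =>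
      have h2 : (k + 2) % 2 = k % 2 := by omega
      have h3 : (k + 2) / 2 = k / 2 + 1 := by omega
      simp only [List.flatMap_cons, h2, h3]
      simpa [List.getD] using ih k

lemma flatPairs_length (l : List (Int × Int)) :
    (l.flatMap (fun xy => [xy.1, xy.2])).length = 2 * l.length := by
  induction l with
  | nil => rfl
  | cons x xs ih => simp [List.flatMap_cons, ih]; omega

-- B's merged list (in Nat form) equals the interleaved sequence
lemma merged_eq_itl (a : List Int) :
    ((((a.take ((a.length + 1) / 2)).zip ((a.drop ((a.length + 1) / 2)).reverse)).flatMap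
        (fun xy => [xy.1, xy.2]))
      ++ (if a.length % 2 = 1 then [a.getD (a.length / 2) 0] else []))
    = itl a := by
  set n := a.length with hn
  set half := (n + 1) / 2 with hhalf
  have hfront : (a.take half).length = half := by
    rw [List.length_take]; omega
  have hback : ((a.drop half).reverse).length = n - half := by
    simp [← hn]
  have hzlen : ((a.take half).zip ((a.drop half).reverse)).length = n / 2 := by
    rw [List.length_zip, hfront, hback]; omega
  have hflen : (((a.take half).zip ((a.drop half).reverse)).flatMap (fun xy => [xy.1, xy.2])).length = 2 * (n / 2) := by
    rw [flatPairs_length, hzlen]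
  apply List.ext_getElem
  · simp only [List.length_append, hflen, itl, List.length_map, List.length_range, ← hn]
    split <;> simp <;> omega
  · intro k hk1 hk2
    have hkn : k < n := by
      simpa [itl, ← hn] using hk2
    have hitl : (itl a)[k] = a.getD (itlIdx n k) 0 := by
      simp [itl, ← hn]
    rw [hitl]
    by_cases hlo : k < 2 * (n / 2)
    · -- inside the zipped part
      rw [List.getElem_append_left (by rw [hflen]; exact hlo)]
      have : (((a.take half).zip ((a.drop half).reverse)).flatMap (fun xy => [xy.1, xy.2]))[k]
          = (((a.take half).zip ((a.drop half).reverse)).flatMap (fun xy => [xy.1, xy.2])).getD k 0 := by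
        rw [List.getD_eq_getElem _ 0 (by rw [hflen]; exact hlo)]
      rw [this, flatPairs_getD]
      have hk2' : k / 2 < n / 2 := by omega
      have hzget : ((a.take half).zip ((a.drop half).reverse)).getD (k / 2) (0, 0)
          = (((a.take half).zip ((a.drop half).reverse))[k / 2]'(by rw [hzlen]; exact hk2')) := by
        rw [List.getD_eq_getElem _ _ (by rw [hzlen]; exact hk2')]
      rw [hzget, List.getElem_zip]
      have hfget : (a.take half)[k / 2]'(by rw [hfront]; omega) = a.getD (k / 2) 0 := by
        rw [List.getElem_take, List.getD_eq_getElem a 0 (by omega)]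
      have hbget : ((a.drop half).reverse)[k / 2]'(by rw [hback]; omega) = a.getD (n - 1 - k / 2) 0 := by
        rw [List.getElem_reverse, List.getElem_drop, List.getD_eq_getElem a 0 (by simp [← hn]; omega)]
        congr 1; simp [← hn]; omega
      unfold itlIdx
      by_cases hpar : k % 2 = 0
      · rw [if_pos hpar, if_pos hpar, hfget]
      · rw [if_neg hpar, if_neg hpar, hbget,
          show n - 1 - k / 2 = n - (k + 1) / 2 by omega]
    · -- the appended middle element (n odd, k = n - 1)
      have hodd : n % 2 = 1 := by omega
      have hkk : k = n - 1 := by omega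
      rw [List.getElem_append_right (by rw [hflen]; omega)]
      have hmid : (if n % 2 = 1 then [a.getD (n / 2) 0] else []) = [a.getD (n / 2) 0] := by
        rw [if_pos hodd]
      simp only [hmid, hflen]
      have hzero : k - 2 * (n / 2) = 0 := by omega
      simp only [hzero, List.getElem_cons_zero]
      rw [show itlIdx n k = n / 2 by unfold itlIdx; rw [if_pos (by omega)]; omega]

lemma portB_eq_pairAll (a : List Int) : alternatingSort_alt a = pairAll (itl a) := by
  unfold alternatingSort_alt
  have hlen : PySem.List.len a = (a.length : Int) := by simp [PySem.List.len_eq]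
  have hhalf : PySem.Int.floordiv ((a.length : Int) + 1) 2 = (((a.length + 1) / 2 : Nat) : Int) := by
    rw [show ((a.length : Int) + 1) = ((a.length + 1 : Nat) : Int) by push_cast; ring]
    exact_mod_cast PySem.Int.floordiv_natCast (a.length + 1) 2
  have hmod : PySem.Int.mod ((a.length : Int)) 2 = ((a.length % 2 : Nat) : Int) := by
    exact_mod_cast PySem.Int.mod_natCast a.length 2
  have hdiv : PySem.Int.floordiv ((a.length : Int)) 2 = (((a.length) / 2 : Nat) : Int) := by
    exact_mod_cast PySem.Int.floordiv_natCast a.length 2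
  simp only [hlen, hhalf, hmod, hdiv, PySem.List.slice_to_natCast, PySem.List.slice_from_natCast,
    PySem.List.foldl_append_eq_flatMap, PySem.List.pyGetD_natCast, List.nil_append]
  have hmodif : (if ((a.length % 2 : Nat) : Int) = 1 then
        ((a.take ((a.length + 1) / 2)).zip ((a.drop ((a.length + 1) / 2)).reverse)).flatMap (fun xy => [xy.1, xy.2])
          ++ [a.getD (a.length / 2) 0]
      else ((a.take ((a.length + 1) / 2)).zip ((a.drop ((a.length + 1) / 2)).reverse)).flatMap (fun xy => [xy.1, xy.2]))
      = itl a := by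
    rw [← merged_eq_itl a]
    by_cases h : a.length % 2 = 1
    · rw [if_pos (by exact_mod_cast h), if_pos h]
    · rw [if_neg (by exact_mod_cast h), if_neg h, List.append_nil]
  rw [hmodif, PySem.List.slice_from_one]
  rfl

-- ===== VERDICT (by name: the statement is the Claim_ definition above) =====
theorem alternatingSort_spec : Claim_equal_alternatingSort := by
  intro a _
  show alternatingSort a = alternatingSort_alt a
  rw [portA_eq_chain, portB_eq_pairAll, chainB_none]
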